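-- pv_equiv track=rewrite | github.com/Vladragone/BMSTU-sem7-testing | benchmark/scripts/analyze_k6_run.py | build_stage_markers
-- ===== SOURCE A (Python) =====
-- def build_stage_markers(profile_rps, stage_duration_seconds, transition_seconds):
--     markers = []
--     offset = 0
--     for i, rps in enumerate(profile_rps):
--         markers.append((offset, f"RPS {rps}"))
--         if i < len(profile_rps) - 1:
--             offset += stage_duration_seconds + transition_seconds
--     return markers
-- ===== SOURCE B (Python) =====
-- def build_stage_markers(profile_rps, stage_duration_seconds, transition_seconds):
--     step = stage_duration_seconds + transition_seconds
--     return [(i * step, f"RPS {rps}") for i, rps in enumerate(profile_rps)]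
-- ===== Notes on version B (the rewrite author's own statement) =====
-- stated objective: simpler
-- what changed: Replaces A's running-accumulator loop (offset += step, bumped conditionally on all but the last index) with the closed form i*step computed independently per position, which is exact because all inputs are integers.
import Mathlib
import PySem

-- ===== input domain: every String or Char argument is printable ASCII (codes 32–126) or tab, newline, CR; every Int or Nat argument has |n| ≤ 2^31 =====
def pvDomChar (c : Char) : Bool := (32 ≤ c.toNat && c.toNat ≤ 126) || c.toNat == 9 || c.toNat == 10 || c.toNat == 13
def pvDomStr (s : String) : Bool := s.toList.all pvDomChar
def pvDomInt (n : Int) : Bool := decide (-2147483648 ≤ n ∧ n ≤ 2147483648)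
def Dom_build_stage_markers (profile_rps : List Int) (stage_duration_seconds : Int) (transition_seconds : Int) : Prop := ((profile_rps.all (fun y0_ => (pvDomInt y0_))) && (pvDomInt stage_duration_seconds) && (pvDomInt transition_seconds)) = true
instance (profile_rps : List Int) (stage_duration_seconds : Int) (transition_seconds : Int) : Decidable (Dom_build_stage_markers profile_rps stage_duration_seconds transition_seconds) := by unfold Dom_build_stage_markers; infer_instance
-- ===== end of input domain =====

-- B replaces A's running accumulator with the exact closed form i*step per position; objective: simpler, no speed claim.

-- ===== PORT A =====
-- A: single fused loop over enumerate(profile_rps), accumulating markers and the offset,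
-- bumping the offset only when i < len(profile_rps) - 1.
def build_stage_markers (profile_rps : List Int) (stage_duration_seconds : Int) (transition_seconds : Int) : List (Int × String) :=
  ((PySem.List.enumerate profile_rps).foldl
    (fun (st : List (Int × String) × Int) (ir : Int × Int) =>
      (st.1 ++ [(st.2, "RPS " ++ PySem.Int.toStr ir.2)],
       if ir.1 < (profile_rps.length : Int) - 1 then st.2 + (stage_duration_seconds + transition_seconds) else st.2))
    (([], 0) : List (Int × String) × Int)).1

-- ===== PORT B =====
-- B: step = sum of durations; one comprehension mapping each (i, rps) to (i*step, label).
def build_stage_markers_alt (profile_rps : List Int) (stage_duration_seconds : Int) (transition_seconds : Int) : List (Int × String) :=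
  let step := stage_duration_seconds + transition_seconds
  (PySem.List.enumerate profile_rps).map (fun ir => (ir.1 * step, "RPS " ++ PySem.Int.toStr ir.2))

-- ===== PRECONDITION & SPEC =====
def Spec_build_stage_markers (profile_rps : List Int) (stage_duration_seconds : Int) (transition_seconds : Int) (out : List (Int × String)) : Prop := out = build_stage_markers_alt profile_rps stage_duration_seconds transition_seconds
instance (profile_rps : List Int) (stage_duration_seconds : Int) (transition_seconds : Int) (out : List (Int × String)) : Decidable (Spec_build_stage_markers profile_rps stage_duration_seconds transition_seconds out) := by unfold Spec_build_stage_markers; infer_instance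

-- ===== CLAIM =====
def Claim_equal_build_stage_markers : Prop := ∀ (profile_rps : List Int) (stage_duration_seconds : Int) (transition_seconds : Int), Dom_build_stage_markers profile_rps stage_duration_seconds transition_seconds → Spec_build_stage_markers profile_rps stage_duration_seconds transition_seconds (build_stage_markers profile_rps stage_duration_seconds transition_seconds)

-- ===== LEMMAS AND PROOFS =====

-- reference: the marker list produced from a profile suffix starting at a given offset
def refMk (s : Int) : List Int → Int → List (Int × String)
  | [], _ => []
  | r :: rest, off => (off, "RPS " ++ PySem.Int.toStr r) :: refMk s rest (off + s)

theorem foldA (s N : Int) (q : List Int) : ∀ (k : Int) (acc : List (Int × String)) (off : Int),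
    k + (q.length : Int) = N →
    ((PySem.List.enumerate q k).foldl
      (fun (st : List (Int × String) × Int) (ir : Int × Int) =>
        (st.1 ++ [(st.2, "RPS " ++ PySem.Int.toStr ir.2)],
         if ir.1 < N - 1 then st.2 + s else st.2)) (acc, off)).1
    = acc ++ refMk s q off := by
  induction q with
  | nil => intro k acc off _; simp [PySem.List.enumerate_nil, refMk]
  | cons r rest ih =>
      intro k acc off hk
      rw [PySem.List.enumerate_cons, List.foldl_cons]
      cases rest with
      | nil =>
          simp [PySem.List.enumerate_nil, refMk]
      | cons r2 rest' =>
          have hlt : k < N - 1 := by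
            simp only [List.length_cons] at hk; push_cast at hk; omega
          simp only [hlt, if_pos]
          rw [ih (k + 1) (acc ++ [(off, "RPS " ++ PySem.Int.toStr r)]) (off + s)
                (by simp only [List.length_cons] at hk ⊢; push_cast at hk ⊢; omega)]
          simp [refMk]

theorem mapB (s : Int) (q : List Int) : ∀ k : Int,
    (PySem.List.enumerate q k).map (fun ir => (ir.1 * s, "RPS " ++ PySem.Int.toStr ir.2))
      = refMk s q (k * s) := by
  induction q with
  | nil => intro k; simp [PySem.List.enumerate_nil, refMk]
  | cons r rest ih =>
      intro k
      rw [PySem.List.enumerate_cons, List.map_cons, ih (k + 1)]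
      simp only [refMk]
      congr 2
      ring

-- ===== VERDICT =====
theorem build_stage_markers_spec : Claim_equal_build_stage_markers := by
  intro p s t _
  simp only [Spec_build_stage_markers, build_stage_markers, build_stage_markers_alt]
  rw [foldA (s + t) (p.length : Int) p 0 [] 0 (by ring), mapB (s + t) p 0]
  simp
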